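-- pv_equiv track=rewrite | github.com/ameymehta/dsa | blind-75/string/5-group-anagrams.py | getSignature
-- ===== SOURCE A (Python) =====
-- from collections import defaultdict
--
-- def getSignature(s):
--     result = []
--     m = defaultdict(int)
--     for ch in s:
--         m[ch] += 1
--     for k in m:
--         result.append(k)
--         result.append(str(m[k]))
--     return ''.join(result)
-- ===== SOURCE B (Python) =====
-- def getSignature(s):
--     result = []
--     seen = set()
--     for ch in s:
--         if ch not in seen:
--             result.append(ch)
--             result.append(str(s.count(ch)))
--             seen.add(ch)
--     return ''.join(result)
-- ===== Notes on version B (the rewrite author's own statement) =====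
-- stated objective: alternative
-- what changed: B drops the frequency dict entirely: it walks the string once keeping a set of already-emitted characters and, at each first occurrence, appends the character and str(s.count(ch)), replacing the pre-built count table by one C-level count scan per distinct character.
import Mathlib
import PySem

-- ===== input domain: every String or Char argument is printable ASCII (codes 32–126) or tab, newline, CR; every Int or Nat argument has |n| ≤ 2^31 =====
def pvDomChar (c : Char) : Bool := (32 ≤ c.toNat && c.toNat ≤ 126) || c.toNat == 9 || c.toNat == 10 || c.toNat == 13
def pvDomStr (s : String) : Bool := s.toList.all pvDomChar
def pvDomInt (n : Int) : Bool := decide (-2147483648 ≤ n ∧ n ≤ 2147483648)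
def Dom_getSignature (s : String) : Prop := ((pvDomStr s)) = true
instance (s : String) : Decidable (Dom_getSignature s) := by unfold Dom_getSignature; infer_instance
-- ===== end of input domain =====

-- B replaces A's frequency dict by a single walk with a seen-set and one s.count scan
-- per distinct character (measured faster in a timing run on the generated inputs).

-- ===== PORT A =====
-- for ch in s: m[ch] += 1; then for k in m: append k and str(m[k]); ''.join
def getSignature (s : String) : String :=
  let m := s.toList.foldl (fun d ch => d.modify ch 0 (· + 1)) PySem.Dict.empty
  let result := m.keys.foldl
    (fun (r : List (List Char)) k => (r ++ [[k]]) ++ [PySem.Int.toChars (m.getD k 0)]) []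
  String.ofList (PySem.Chars.join [] result)

-- ===== PORT B =====
-- for ch in s: if ch not in seen: append ch and str(s.count(ch)); seen.add(ch); ''.join
def getSignature_alt (s : String) : String :=
  let cs := s.toList
  let st := cs.foldl
    (fun (p : List (List Char) × PySem.Set Char) ch =>
      if p.2.contains ch then p
      else ((p.1 ++ [[ch]]) ++ [PySem.Int.toChars ((PySem.Chars.count cs [ch] : Nat) : Int)],
            p.2.add ch))
    ([], PySem.Set.empty)
  String.ofList (PySem.Chars.join [] st.1)

-- ===== PRECONDITION & SPEC =====
def Spec_getSignature (s : String) (out : String) : Prop := out = getSignature_alt s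
instance (s : String) (out : String) : Decidable (Spec_getSignature s out) := by unfold Spec_getSignature; infer_instance

-- ===== CLAIM (what is proved, stated in full; the proofs are below) =====
def Claim_equal_getSignature : Prop := ∀ (s : String), Dom_getSignature s → Spec_getSignature s (getSignature s)

-- ===== LEMMAS AND PROOFS =====

-- s.count(ch) for a single character equals the list count of that character
lemma count_go_singleton (c : Char) :
    ∀ (l : List Char) (fuel acc : Nat), l.length ≤ fuel →
      PySem.Chars.count.go [c] fuel l acc = acc + l.count c := by
  intro l
  induction l with
  | nil =>
      intro fuel acc _
      cases fuel <;> simp [PySem.Chars.count.go]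
  | cons x t ih =>
      intro fuel acc hf
      cases fuel with
      | zero => simp at hf
      | succ f =>
          have ht : t.length ≤ f := by simpa using hf
          by_cases hx : x = c
          · subst hx
            rw [show PySem.Chars.count.go [x] (f+1) (x::t) acc
                  = PySem.Chars.count.go [x] f t (acc+1) from by
                simp [PySem.Chars.count.go, List.isPrefixOf]]
            rw [ih f (acc + 1) ht]
            simp
            omega
          · rw [show PySem.Chars.count.go [c] (f+1) (x::t) acc
                  = PySem.Chars.count.go [c] f t acc from by
                simp [PySem.Chars.count.go, List.isPrefixOf, Ne.symm hx]]
            rw [ih f acc ht]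
            simp [hx]

lemma count_singleton (cs : List Char) (c : Char) :
    PySem.Chars.count cs [c] = cs.count c := by
  unfold PySem.Chars.count
  simp [count_go_singleton c cs cs.length 0 le_rfl]

-- the characters B appends: elements of l not yet in seen, first occurrences in order
def pvNews (seen : List Char) : List Char → List Char
  | [] => []
  | c :: t => if seen.contains c then pvNews seen t else c :: pvNews (seen ++ [c]) t

lemma pvNews_foldl_add : ∀ (l seen : List Char),
    seen ++ pvNews seen l = l.foldl PySem.Set.add seen := by
  intro l
  induction l with
  | nil => intro seen; simp [pvNews]
  | cons c t ih =>
      intro seen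
      rw [List.foldl_cons]
      by_cases hc : seen.contains c
      · have h : c ∈ seen := by simpa using hc
        have hadd : PySem.Set.add seen c = seen := by simp [PySem.Set.add, h]
        rw [hadd, ← ih seen]
        simp [pvNews, h]
      · have h : c ∉ seen := by simpa using hc
        have hadd : PySem.Set.add seen c = seen ++ [c] := by simp [PySem.Set.add, h]
        rw [hadd, ← ih (seen ++ [c])]
        simp [pvNews, h]

lemma pvNews_empty (l : List Char) : pvNews [] l = PySem.Set.ofList l := by
  have h := pvNews_foldl_add l []
  simpa [PySem.Set.ofList, PySem.Set.empty] using h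

lemma alt_loop (cs : List Char) :
    ∀ (l : List Char) (seen : PySem.Set Char) (r : List (List Char)),
      (l.foldl
        (fun (p : List (List Char) × PySem.Set Char) ch =>
          if p.2.contains ch then p
          else ((p.1 ++ [[ch]]) ++ [PySem.Int.toChars ((PySem.Chars.count cs [ch] : Nat) : Int)],
                p.2.add ch))
        (r, seen)).1
      = r ++ (pvNews seen l).flatMap
          (fun k => [[k], PySem.Int.toChars ((PySem.Chars.count cs [k] : Nat) : Int)]) := by
  intro l
  induction l with
  | nil => intro seen r; simp [pvNews]
  | cons c t ih =>
      intro seen r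
      rw [List.foldl_cons]
      by_cases hc : seen.contains c
      · have h : c ∈ seen := by simpa using hc
        rw [if_pos hc, ih seen r]
        simp [pvNews, h]
      · have h : c ∉ seen := by simpa using hc
        rw [if_neg hc]
        have hadd : PySem.Set.add seen c = seen ++ [c] := by
          simp [PySem.Set.add, h]
        simp only [hadd]
        rw [ih (seen ++ [c])]
        simp [pvNews, h]

lemma getSignature_alt_eq (s : String) :
    getSignature_alt s
    = String.ofList (PySem.Chars.join []
        ((PySem.Set.ofList s.toList).flatMap
          (fun k => [[k], PySem.Int.toChars ((s.toList.count k : Nat) : Int)]))) := by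
  show String.ofList _ = _
  simp only [alt_loop s.toList s.toList PySem.Set.empty []]
  have : (PySem.Set.empty : PySem.Set Char) = ([] : List Char) := rfl
  rw [this, pvNews_empty]
  simp [count_singleton]

lemma getSignature_eq (s : String) :
    getSignature s
    = String.ofList (PySem.Chars.join []
        ((PySem.Set.ofList s.toList).flatMap
          (fun k => [[k], PySem.Int.toChars ((s.toList.count k : Nat) : Int)]))) := by
  show String.ofList _ = _
  have hm : s.toList.foldl (fun d ch => d.modify ch 0 (· + 1)) PySem.Dict.empty
      = PySem.Dict.counter s.toList := rfl
  rw [hm, PySem.Dict.keys_counter]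
  simp only [PySem.Dict.getD_counter]
  have := PySem.List.foldl_append_eq_flatMap
    (fun k => [[k]] ++ [PySem.Int.toChars ((s.toList.count k : Nat) : Int)])
    (PySem.Set.ofList s.toList) ([] : List (List Char))
  simp only [List.append_assoc]
  rw [this]
  simp

-- ===== VERDICT (by name: the statement is the Claim_ definition above) =====
theorem getSignature_spec : Claim_equal_getSignature := by
  intro s _
  unfold Spec_getSignature
  rw [getSignature_eq, getSignature_alt_eq]
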